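-- pv_equiv track=rewrite | github.com/kit-data-manager/EVOKS | evoks/vocabularies/views.py | convert_predicate
-- ===== SOURCE A (Python) =====
-- from typing import List, Tuple
--
-- def convert_predicate(namespaces: List[Tuple[str, str]], predicate: str) -> str:
--     """Convert a URI predicate to a shortened predicate with namespaces
--
--     Args:
--         namespaces (List[(str, str)]): List of namespace tuples (prefix, url)
--         predicate (str): predicate to be shortened
--
--     Returns:
--         str: shortened predicate
--     """
--     # get type of predicate
--     type = predicate.rsplit('#', 1)[-1]
--     if type == predicate:
--         type = predicate.rsplit('/', 1)[-1]
--
--     # algorithm to find the longest prefix that is a perfect match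
--     max = 0
--     max_prefix = None
--     count = 0
--     # iterate over namespaces
--     for s, p in namespaces:
--         # iterate over letters in predicate
--         for i, e in enumerate(p):
--             # if not out of range and letters are equal
--             if len(predicate) > i and e == predicate[i]:
--                 count += 1
--             else:  # out of range, bad luck:(
--                 continue
--         # new best match and matching on complete length
--         if count > max and count == len(p):
--             max = count
--             max_prefix = (s, p)
--         count = 0
--
--     # no prefix found, predicate is just a normal URI
--     if max_prefix is None:
--         return predicate
--     return '{prefix}:{type}'.format(
--         prefix=max_prefix[0], type=type)
-- ===== SOURCE B (Python) =====
-- from typing import List, Tuple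
--
-- def convert_predicate(namespaces: List[Tuple[str, str]], predicate: str) -> str:
--     """Shorten a URI predicate using the longest matching namespace url."""
--     type = predicate.rsplit('#', 1)[-1]
--     if type == predicate:
--         type = predicate.rsplit('/', 1)[-1]
--
--     # longest urls first; the sort is stable, so among equal-length urls
--     # the earliest namespace in the input wins, and we return on the
--     # first real (non-empty) prefix match instead of scanning everything.
--     ordered = sorted(namespaces, key=lambda sp: len(sp[1]), reverse=True)
--     for s, p in ordered:
--         if p and predicate.startswith(p):
--             return '{}:{}'.format(s, type)
--     return predicate
-- ===== Notes on version B (the rewrite author's own statement) =====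
-- stated objective: simpler
-- what changed: Replaces A's per-namespace character-by-character match-counting with running-max bookkeeping by a stable length-descending sort of the namespaces followed by an early return on the first non-empty url that is a prefix of the predicate.
import Mathlib
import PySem

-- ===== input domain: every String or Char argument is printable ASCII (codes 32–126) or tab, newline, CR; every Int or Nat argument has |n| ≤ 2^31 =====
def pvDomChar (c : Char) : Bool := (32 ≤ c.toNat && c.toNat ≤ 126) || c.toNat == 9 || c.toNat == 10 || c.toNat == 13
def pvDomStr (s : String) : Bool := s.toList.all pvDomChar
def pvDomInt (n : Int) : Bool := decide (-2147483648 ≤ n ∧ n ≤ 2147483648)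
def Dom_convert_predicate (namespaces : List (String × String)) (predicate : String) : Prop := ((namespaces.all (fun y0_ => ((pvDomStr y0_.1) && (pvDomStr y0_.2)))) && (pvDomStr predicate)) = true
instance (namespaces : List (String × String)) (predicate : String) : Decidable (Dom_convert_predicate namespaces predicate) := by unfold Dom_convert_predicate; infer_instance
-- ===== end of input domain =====

-- B replaces A's per-namespace character-counting scan by a stable length-descending
-- sort followed by a first-prefix-match early return (objective: simpler).

-- exact hand port of s.rsplit(c, 1)[-1]: the part after the LAST occurrence of c,
-- or the whole string when c does not occur (shared: A's and B's "type" block is identical)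
def rsplitLast (s : String) (c : Char) : String :=
  String.ofList (s.toList.foldl (fun acc ch => if ch = c then [] else acc ++ [ch]) [])

-- the shared "type" computation of Source A and Source B (their first three lines are identical)
def typeOf (predicate : String) : String :=
  let t := rsplitLast predicate '#'
  if t = predicate then rsplitLast predicate '/' else t

-- ===== PORT A =====
-- the inner `for i, e in enumerate(p)` counting loop of A
def countA (predicate p : String) : Nat :=
  (PySem.List.enumerate p.toList 0).foldl
    (fun count ie =>
      if decide ((predicate.toList.length : Int) > ie.1) && (PySem.Str.pyGet? predicate ie.1 == some ie.2)
      then count + 1 else count) 0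

-- the outer `for s, p in namespaces` loop of A: state (max, max_prefix)
def loopA (predicate : String) (namespaces : List (String × String)) : Nat × Option (String × String) :=
  namespaces.foldl
    (fun st sp =>
      let count := countA predicate sp.2
      if st.1 < count ∧ (count : Int) = PySem.Str.len sp.2 then (count, some sp) else st)
    (0, none)

def convert_predicate (namespaces : List (String × String)) (predicate : String) : String :=
  let ty := typeOf predicate
  match (loopA predicate namespaces).2 with
  | none => predicate
  | some mp => String.ofList (mp.1.toList ++ ':' :: ty.toList)  -- '{prefix}:{type}'.format(...)

-- ===== PORT B =====
-- Source B's `for s, p in ordered: if p and predicate.startswith(p): return …` loop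
def findShort (predicate ty : String) : List (String × String) → String
  | [] => predicate
  | sp :: rest =>
    if (!(sp.2 == "")) && PySem.Str.startswith predicate sp.2
    then String.ofList (sp.1.toList ++ ':' :: ty.toList)  -- '{}:{}'.format(s, type)
    else findShort predicate ty rest

def convert_predicate_alt (namespaces : List (String × String)) (predicate : String) : String :=
  let ty := typeOf predicate
  findShort predicate ty (PySem.List.sorted namespaces (fun sp => PySem.Str.len sp.2) true)

-- ===== PRECONDITION & SPEC =====
def Spec_convert_predicate (namespaces : List (String × String)) (predicate : String) (out : String) : Prop := out = convert_predicate_alt namespaces predicate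
instance (namespaces : List (String × String)) (predicate : String) (out : String) : Decidable (Spec_convert_predicate namespaces predicate out) := by unfold Spec_convert_predicate; infer_instance

-- ===== CLAIM (what is proved, stated in full; the proofs are below) =====
def Claim_equal_convert_predicate : Prop := ∀ (namespaces : List (String × String)) (predicate : String), Dom_convert_predicate namespaces predicate → Spec_convert_predicate namespaces predicate (convert_predicate namespaces predicate)

-- ===== LEMMAS AND PROOFS =====

-- B's per-namespace test, as a named predicate for the proofs
def matchB (predicate : String) (sp : String × String) : Bool :=
  (!(sp.2 == "")) && PySem.Str.startswith predicate sp.2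

-- the sort key, for the proofs
def keyB (sp : String × String) : Int := PySem.Str.len sp.2

lemma keyB_eq (sp : String × String) : keyB sp = (sp.2.toList.length : Int) := by
  simp [keyB, PySem.Str.len]

lemma matchB_iff (predicate : String) (sp : String × String) :
    matchB predicate sp = true ↔ sp.2.toList ≠ [] ∧ sp.2.toList <+: predicate.toList := by
  have hne : (!(sp.2 == "")) = true ↔ sp.2.toList ≠ [] := by
    rw [Bool.not_eq_eq_eq_not, Bool.not_true, beq_eq_false_iff_ne]
    constructor
    · intro h hnil
      exact h (by rw [← String.toList_inj, hnil]; rfl)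
    · intro h he
      exact h (by rw [he]; rfl)
  rw [matchB, Bool.and_eq_true, hne, PySem.Str.startswith_eq, PySem.Chars.startswith_iff]

-- characterization of A's inner counting loop
lemma countA_fold (predicate : String) (cs : List Char) (k acc : Nat) :
    ((PySem.List.enumerate cs (k : Int)).foldl
      (fun count ie =>
        if decide ((predicate.toList.length : Int) > ie.1) && (PySem.Str.pyGet? predicate ie.1 == some ie.2)
        then count + 1 else count) acc ≤ acc + cs.length)
    ∧ ((PySem.List.enumerate cs (k : Int)).foldl
      (fun count ie =>
        if decide ((predicate.toList.length : Int) > ie.1) && (PySem.Str.pyGet? predicate ie.1 == some ie.2)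
        then count + 1 else count) acc = acc + cs.length ↔ cs <+: predicate.toList.drop k) := by
  induction cs generalizing k acc with
  | nil => simp [PySem.List.enumerate_nil]
  | cons c cs ih =>
    rw [PySem.List.enumerate_cons]
    have hcast : (k : Int) + 1 = ((k + 1 : Nat) : Int) := by push_cast; ring
    rw [List.foldl_cons, hcast]
    simp only [List.length_cons]
    by_cases hk : k < predicate.toList.length
    · have hk' : k < predicate.length := by simpa using hk
      have hdrop : predicate.toList.drop k = predicate.toList[k] :: predicate.toList.drop (k + 1) :=
        List.drop_eq_getElem_cons hk
      by_cases hc : predicate.toList[k] = c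
      · have hcond : (decide ((predicate.toList.length : Int) > (k : Int))
            && (PySem.Str.pyGet? predicate (k : Int) == some c)) = true := by
          simp [hk']
          exact hc
        simp only [hcond, if_true]
        obtain ⟨h1, h2⟩ := ih (k + 1) (acc + 1)
        rw [hdrop, hc]
        refine ⟨by omega, ?_⟩
        rw [List.cons_prefix_cons]
        constructor
        · intro h; exact ⟨rfl, h2.mp (by omega)⟩
        · rintro ⟨-, h⟩; have := h2.mpr h; omega
      · have hcond : (decide ((predicate.toList.length : Int) > (k : Int))
            && (PySem.Str.pyGet? predicate (k : Int) == some c)) = false := by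
          simp [List.getElem?_eq_getElem hk]
          exact fun _ => hc
        simp only [hcond, Bool.false_eq_true, if_false]
        obtain ⟨h1, h2⟩ := ih (k + 1) acc
        refine ⟨by omega, ?_⟩
        rw [hdrop, List.cons_prefix_cons]
        constructor
        · intro h; exfalso; omega
        · rintro ⟨hceq, -⟩; exact absurd hceq.symm hc
    · have hk' : ¬ k < predicate.length := by simpa using hk
      have hnone : predicate.toList[k]? = none := by
        rw [List.getElem?_eq_none_iff]; omega
      have hcond : (decide ((predicate.toList.length : Int) > (k : Int))
          && (PySem.Str.pyGet? predicate (k : Int) == some c)) = false := by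
        simp only [PySem.Str.pyGet?_natCast, hnone]
        simp
      simp only [hcond, Bool.false_eq_true, if_false]
      obtain ⟨h1, h2⟩ := ih (k + 1) acc
      have hdrop : predicate.toList.drop k = [] := by
        apply List.drop_eq_nil_of_le; omega
      refine ⟨by omega, ?_⟩
      constructor
      · intro h; exfalso; omega
      · intro h; rw [hdrop] at h; simp at h

lemma countA_eq_iff (predicate p : String) :
    countA predicate p = p.toList.length ↔ p.toList <+: predicate.toList := by
  have := (countA_fold predicate p.toList 0 0).2
  simpa [countA] using this

-- A's loop step, re-expressed with the prefix test (proof-side helper)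
def stepP (predicate : String) (st : Nat × Option (String × String)) (sp : String × String) :
    Nat × Option (String × String) :=
  if sp.2.toList <+: predicate.toList ∧ st.1 < sp.2.toList.length
  then (sp.2.toList.length, some sp) else st

-- A's outer loop, re-expressed with the prefix test in the step
lemma loopA_eq (predicate : String) (namespaces : List (String × String)) :
    loopA predicate namespaces = namespaces.foldl (stepP predicate) (0, none) := by
  unfold loopA
  congr 1
  funext st sp
  simp only [stepP, PySem.Str.len]
  by_cases hp : sp.2.toList <+: predicate.toList
  · rw [(countA_eq_iff predicate sp.2).mpr hp]
    by_cases hlt : st.1 < sp.2.toList.length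
    · simp [hp]
    · simp [hp]
  · have hc : countA predicate sp.2 ≠ sp.2.toList.length :=
      fun h => hp ((countA_eq_iff _ _).mp h)
    simp only [hp, false_and]
    rw [if_neg (fun hcl => hc (by exact_mod_cast hcl.2)), if_neg not_false]

-- every element a length-descending pairwise list drops (before the insertion
-- point of x) has key strictly below keyB x
lemma dropWhile_key_lt (x : String × String) (r : List (String × String))
    (hpair : r.Pairwise (fun a b => keyB b ≤ keyB a)) :
    ∀ y ∈ r.dropWhile (fun y => !decide (keyB y < keyB x)), keyB y < keyB x := by
  induction r with
  | nil => simp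
  | cons a r ih =>
    rw [List.dropWhile_cons]
    rcases List.pairwise_cons.mp hpair with ⟨ha, hr⟩
    by_cases h : (!decide (keyB a < keyB x)) = true
    · rw [if_pos h]; exact ih hr
    · rw [if_neg h]
      intro y hy
      rcases List.mem_cons.mp hy with rfl | hy
      · simpa using h
      · have h1 : keyB y ≤ keyB a := ha y hy
        have h2 : keyB a < keyB x := by simpa using h
        omega

-- findShort as find? over matchB
lemma findShort_eq_find? (predicate ty : String) (l : List (String × String)) :
    findShort predicate ty l = match l.find? (matchB predicate) with
      | none => predicate
      | some sp => String.ofList (sp.1.toList ++ ':' :: ty.toList) := by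
  induction l with
  | nil => simp [findShort]
  | cons sp rest ih =>
    rw [findShort, List.find?_cons]
    cases h : matchB predicate sp with
    | true =>
      rw [matchB] at h
      rw [if_pos h]
    | false =>
      rw [matchB] at h
      rw [if_neg (by rw [h]; simp), ih]

-- insertBy decomposes as takeWhile/dropWhile
lemma insertBy_eq (b : (String × String) → (String × String) → Bool) (x : String × String)
    (l : List (String × String)) :
    PySem.List.insertBy b x l = l.takeWhile (fun y => !b x y) ++ x :: l.dropWhile (fun y => !b x y) := by
  induction l with
  | nil => simp [PySem.List.insertBy]
  | cons y ys ih =>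
    rw [PySem.List.insertBy]
    by_cases h : b x y = true
    · simp [h]
    · simp only [Bool.not_eq_true] at h
      simp [h, ih]

-- matchB elements carry a positive key
lemma matchB_key_pos (predicate : String) (sp : String × String)
    (h : matchB predicate sp = true) : 0 < keyB sp := by
  rcases (matchB_iff predicate sp).mp h with ⟨hne, -⟩
  rw [keyB_eq]
  have : sp.2.toList.length ≠ 0 := fun h0 => hne (List.eq_nil_of_length_eq_zero h0)
  omega

-- two matchers are related through A's step condition
lemma matchB_stepP_true (predicate : String) (st : Nat × Option (String × String))
    (x : String × String) (hx : matchB predicate x = true) (hlt : (st.1 : Int) < keyB x) :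
    stepP predicate st x = (x.2.toList.length, some x) := by
  rcases (matchB_iff predicate x).mp hx with ⟨-, hpre⟩
  rw [keyB_eq] at hlt
  rw [stepP, if_pos ⟨hpre, by exact_mod_cast hlt⟩]

-- the main invariant, stated over the rewritten loop
lemma inv_aux (predicate : String) (namespaces : List (String × String)) :
    (PySem.List.sorted namespaces keyB true).find? (matchB predicate)
      = (namespaces.foldl (stepP predicate) (0, none)).2
    ∧ (∀ sp ∈ namespaces, matchB predicate sp = true →
        keyB sp ≤ ((namespaces.foldl (stepP predicate) (0, none)).1 : Int))
    ∧ (∀ sp, (namespaces.foldl (stepP predicate) (0, none)).2 = some sp →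
        keyB sp = ((namespaces.foldl (stepP predicate) (0, none)).1 : Int))
    ∧ ((namespaces.foldl (stepP predicate) (0, none)).2 = none →
        (namespaces.foldl (stepP predicate) (0, none)).1 = 0) := by
  induction namespaces using List.reverseRecOn with
  | nil =>
    rw [PySem.List.sorted_rev_eq_foldl_insertBy]
    simp
  | append_singleton ns x ih =>
    obtain ⟨hfind, hbound, hkey, hnone⟩ := ih
    have hsnoc : PySem.List.sorted (ns ++ [x]) keyB true
        = PySem.List.insertBy (fun a b => decide (keyB b < keyB a)) x
            (PySem.List.sorted ns keyB true) := by
      rw [PySem.List.sorted_rev_eq_foldl_insertBy, PySem.List.sorted_rev_eq_foldl_insertBy,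
        List.foldl_append, List.foldl_cons, List.foldl_nil]
    have hfoldl : (ns ++ [x]).foldl (stepP predicate) (0, none)
        = stepP predicate (ns.foldl (stepP predicate) (0, none)) x := by
      rw [List.foldl_append, List.foldl_cons, List.foldl_nil]
    set st := ns.foldl (stepP predicate) (0, none) with hst
    set r := PySem.List.sorted ns keyB true with hr
    have hpair : r.Pairwise (fun a b => keyB b ≤ keyB a) :=
      PySem.List.sorted_pairwise_rev ns keyB
    have hins : PySem.List.insertBy (fun a b => decide (keyB b < keyB a)) x r
        = r.takeWhile (fun y => !decide (keyB y < keyB x)) ++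
            x :: r.dropWhile (fun y => !decide (keyB y < keyB x)) :=
      insertBy_eq _ _ _
    set t := r.takeWhile (fun y => !decide (keyB y < keyB x)) with ht
    set d := r.dropWhile (fun y => !decide (keyB y < keyB x)) with hd
    have htd : t ++ d = r := List.takeWhile_append_dropWhile
    have hmem_t : ∀ y ∈ t, keyB x ≤ keyB y := by
      intro y hy
      have := List.mem_takeWhile_imp hy
      simpa using this
    have hmem_d : ∀ y ∈ d, keyB y < keyB x := dropWhile_key_lt x r hpair
    have hmem_r : ∀ y ∈ r, y ∈ ns := by
      intro y hy
      exact (PySem.List.mem_sorted ns keyB true y).mp hy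
    rw [hsnoc, hins, hfoldl]
    by_cases hx : matchB predicate x = true
    · by_cases hlt : (st.1 : Int) < keyB x
      · -- new best: x
        rw [matchB_stepP_true predicate st x hx hlt]
        have htnone : t.find? (matchB predicate) = none := by
          rw [List.find?_eq_none]
          intro y hy hmy
          have h1 : keyB y ≤ (st.1 : Int) := hbound y (hmem_r y ((htd ▸ List.mem_append_left d hy))) hmy
          have h2 : keyB x ≤ keyB y := hmem_t y hy
          omega
        refine ⟨?_, ?_, ?_, ?_⟩
        · simp [List.find?_append, htnone, hx]
        · intro sp hsp hmsp
          rcases List.mem_append.mp hsp with hsp | hsp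
          · have := hbound sp hsp hmsp
            rw [keyB_eq]
            simp only [keyB_eq] at this hlt ⊢
            omega
          · rw [List.mem_singleton.mp hsp, keyB_eq]
        · intro sp hsp
          injection hsp with hsp
          rw [← hsp, keyB_eq]
        · intro h; cases h
      · -- x matches but is not longer than the current best
        rw [not_lt] at hlt
        obtain ⟨sp0, hsp0⟩ : ∃ sp0, st.2 = some sp0 := by
          cases h2 : st.2 with
          | some sp0 => exact ⟨sp0, rfl⟩
          | none =>
            exfalso
            have h0 := hnone h2
            have := matchB_key_pos predicate x hx
            rw [h0] at hlt
            omega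
        have hk0 : keyB sp0 = (st.1 : Int) := hkey sp0 hsp0
        have hstep : stepP predicate st x = st := by
          rw [stepP]
          rcases (matchB_iff predicate x).mp hx with ⟨-, hpre⟩
          rw [if_neg]
          rintro ⟨-, hl⟩
          rw [keyB_eq] at hlt
          have : (st.1 : Int) < x.2.toList.length := by exact_mod_cast hl
          omega
        have htfind : t.find? (matchB predicate) = some sp0 := by
          have h1 : (t.find? (matchB predicate)).or (d.find? (matchB predicate)) = some sp0 := by
            rw [← List.find?_append, htd, hfind, hsp0]
          cases h2 : t.find? (matchB predicate) with
          | some z => rw [h2] at h1; simpa using h1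
          | none =>
            exfalso
            rw [h2, Option.none_or] at h1
            have hmem : sp0 ∈ d := List.mem_of_find?_eq_some h1
            have := hmem_d sp0 hmem
            omega
        rw [hstep]
        refine ⟨?_, ?_, hkey, hnone⟩
        · rw [List.find?_append, htfind, Option.some_or, hsp0]
        · intro sp hsp hmsp
          rcases List.mem_append.mp hsp with hsp | hsp
          · exact hbound sp hsp hmsp
          · rw [List.mem_singleton.mp hsp]; exact hlt
    · -- x does not match: nothing changes
      have hxf : matchB predicate x = false := by simpa using hx
      have hstep : stepP predicate st x = st := by
        rw [stepP, if_neg]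
        rintro ⟨hpre, hl⟩
        rcases (matchB_iff predicate x).mpr.mt (by simp [hxf]) with h
        by_cases hnil : x.2.toList = []
        · rw [hnil] at hl; simp at hl
        · exact h ⟨hnil, hpre⟩
      rw [hstep]
      refine ⟨?_, ?_, hkey, hnone⟩
      · simp only [List.find?_append, List.find?_cons, hxf]
        rw [← List.find?_append, htd, hfind]
      · intro sp hsp hmsp
        rcases List.mem_append.mp hsp with hsp | hsp
        · exact hbound sp hsp hmsp
        · rw [List.mem_singleton.mp hsp] at hmsp
          rw [hmsp] at hxf
          cases hxf

-- the main invariant: first matcher of the sorted list = A's running best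
lemma main_inv (predicate : String) (namespaces : List (String × String)) :
    (PySem.List.sorted namespaces (fun sp => PySem.Str.len sp.2) true).find? (matchB predicate)
      = (loopA predicate namespaces).2 := by
  rw [loopA_eq]
  exact (inv_aux predicate namespaces).1

-- ===== VERDICT (by name: the statement is the Claim_ definition above) =====
theorem convert_predicate_spec : Claim_equal_convert_predicate := by
  intro namespaces predicate _
  unfold Spec_convert_predicate
  unfold convert_predicate convert_predicate_alt
  rw [findShort_eq_find?, main_inv predicate namespaces]
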